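-- pv_equiv track=rewrite | github.com/siawyoung/practice | completed/pick-up-coins.py | maximum_margin
-- ===== SOURCE A (Python) =====
-- def maximum_margin(arr):
--     table = [ [ None for y in range(len(arr)) ] for x in range(len(arr)) ]
--
--     def calculate_max_margin(a, b):
--         if a > b:
--             return 0
--
--         if not table[a][b]:
--
--             # assuming that the opponent always picks the best option available
--             max_if_pick_left = arr[a] + min(calculate_max_margin(a + 1, b - 1), calculate_max_margin(a + 2, b))
--             max_if_pick_right = arr[b] + min(calculate_max_margin(a, b - 2), calculate_max_margin(a + 1, b - 1))
--
--             table[a][b] = max(max_if_pick_left, max_if_pick_right)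
--
--         return table[a][b]
--
--     return calculate_max_margin(0, len(arr) - 1)
-- ===== SOURCE B (Python) =====
-- def maximum_margin(arr):
--     # Bottom-up interval DP with a rolling row: every subproblem of an
--     # interval of length L has length L-2, so only rows of one parity
--     # of n are ever computed.
--     n = len(arr)
--     if n == 0:
--         return 0
--     g = [0] * (n + 2)          # row for "length <= 0" intervals: all zero
--     L = 2 - (n % 2)            # smallest positive length with n's parity
--     while L <= n:
--         g = [max(arr[a] + min(g[a + 1], g[a + 2]),
--                  arr[a + L - 1] + min(g[a], g[a + 1]))
--              for a in range(n - L + 1)]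
--         L += 2
--     return g[0]
-- ===== Notes on version B (the rewrite author's own statement) =====
-- stated objective: alternative
-- what changed: Replaces A's memoized top-down recursion over intervals by a bottom-up DP that iterates interval length (only lengths of n's parity, since every subproblem has length L-2) keeping a single rolling row, so no n x n table and no recursion.
import Mathlib
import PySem

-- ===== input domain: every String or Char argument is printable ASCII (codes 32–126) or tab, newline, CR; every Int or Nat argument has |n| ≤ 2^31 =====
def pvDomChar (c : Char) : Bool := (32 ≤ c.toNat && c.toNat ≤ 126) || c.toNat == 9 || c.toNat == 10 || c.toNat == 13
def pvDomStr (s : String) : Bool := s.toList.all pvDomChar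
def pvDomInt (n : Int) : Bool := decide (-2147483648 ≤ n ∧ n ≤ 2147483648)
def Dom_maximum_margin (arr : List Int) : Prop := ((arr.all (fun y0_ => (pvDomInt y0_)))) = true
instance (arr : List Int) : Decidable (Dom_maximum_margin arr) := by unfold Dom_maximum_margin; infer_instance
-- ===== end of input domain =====

-- B replaces A's memoized top-down recursion by a bottom-up rolling-row interval DP
-- (objective: alternative decomposition; same O(n^2) work, O(n) extra space).

-- ===== PORT A =====
-- A's inner recursion calculate_max_margin.  The memo table is omitted: A's own
-- falsy-valued memo check recomputes entries whose value is 0 anyway, and the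
-- memoised value always equals the recomputed one, so the returned value is the
-- plain recursion's value.  arr[a]/arr[b] are ported with pyGet?; on every call
-- reachable from maximum_margin the index is in range (0 ≤ a ≤ b ≤ len-1), so
-- the .getD 0 default is never the value Python would not produce.
def calcA (arr : List Int) (a b : Int) : Int :=
  if a > b then 0
  else
    let max_if_pick_left := (PySem.List.pyGet? arr a).getD 0 +
      min (calcA arr (a + 1) (b - 1)) (calcA arr (a + 2) b)
    let max_if_pick_right := (PySem.List.pyGet? arr b).getD 0 +
      min (calcA arr a (b - 2)) (calcA arr (a + 1) (b - 1))
    max max_if_pick_left max_if_pick_right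
termination_by (b - a + 1).toNat
decreasing_by all_goals omega

def maximum_margin (arr : List Int) : Int :=
  calcA arr 0 ((arr.length : Int) - 1)

-- ===== PORT B =====
-- one row of Source B's list comprehension: values for all intervals of length L,
-- computed from g, the row for length L-2 (out-of-row reads default to 0 but are
-- in range on every reachable call)
def rowNew (arr g : List Int) (n L : Int) : List Int :=
  (PySem.List.pyRange 0 (n - L + 1) 1).map (fun a =>
    max (PySem.List.pyGetD arr a 0 +
           min (PySem.List.pyGetD g (a + 1) 0) (PySem.List.pyGetD g (a + 2) 0))
        (PySem.List.pyGetD arr (a + L - 1) 0 +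
           min (PySem.List.pyGetD g a 0) (PySem.List.pyGetD g (a + 1) 0)))

-- Source B's while loop
def rowLoop (arr : List Int) (n : Int) (g : List Int) (L : Int) : List Int :=
  if L > n then g
  else rowLoop arr n (rowNew arr g n L) (L + 2)
termination_by (n - L + 1).toNat
decreasing_by omega

def maximum_margin_alt (arr : List Int) : Int :=
  let n : Int := arr.length
  if n == 0 then 0
  else
    let g := List.replicate (n + 2).toNat (0 : Int)
    let g := rowLoop arr n g (2 - PySem.Int.mod n 2)
    PySem.List.pyGetD g 0 0

-- ===== PRECONDITION & SPEC =====
def Spec_maximum_margin (arr : List Int) (out : Int) : Prop := out = maximum_margin_alt arr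
instance (arr : List Int) (out : Int) : Decidable (Spec_maximum_margin arr out) := by unfold Spec_maximum_margin; infer_instance

-- ===== CLAIM (what is proved, stated in full; the proofs are below) =====
def Claim_equal_maximum_margin : Prop := ∀ (arr : List Int), Dom_maximum_margin arr → Spec_maximum_margin arr (maximum_margin arr)

-- ===== LEMMAS AND PROOFS =====

-- any read of a replicate-0 list with default 0 is 0
theorem pyGetD_replicate_zero (k : Nat) (i : Int) :
    PySem.List.pyGetD (List.replicate k (0 : Int)) i 0 = 0 := by
  unfold PySem.List.pyGetD
  cases h : PySem.List.pyGet? (List.replicate k (0 : Int)) i with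
  | none => rfl
  | some x =>
    have hx := PySem.List.mem_of_pyGet?_eq_some _ h
    simp_all [List.eq_of_mem_replicate hx]

-- row invariant: g holds the recursion's values for all intervals of length M
def RowInv (arr : List Int) (n : Int) (g : List Int) (M : Int) : Prop :=
  ∀ a : Int, 0 ≤ a → a ≤ n - M →
    PySem.List.pyGetD g a 0 = calcA arr a (a + M - 1)

-- one comprehension step preserves the invariant, length L-2 → L
theorem rowNew_inv (arr g : List Int) (n L : Int)
    (hL1 : 1 ≤ L) (hInv : RowInv arr n g (L - 2)) :
    RowInv arr n (rowNew arr g n L) L := by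
  intro a ha0 haU
  unfold rowNew
  rw [PySem.List.pyGetD_map_pyRange_of_nonneg _ _ _ _ ha0 (by omega)]
  have e1 : PySem.List.pyGetD g (a + 1) 0 = calcA arr (a + 1) (a + L - 2) := by
    have := hInv (a + 1) (by omega) (by omega)
    rw [this]; congr 1; ring
  have e2 : PySem.List.pyGetD g (a + 2) 0 = calcA arr (a + 2) (a + L - 1) := by
    have := hInv (a + 2) (by omega) (by omega)
    rw [this]; congr 1; ring
  have e0 : PySem.List.pyGetD g a 0 = calcA arr a (a + L - 3) := by
    have := hInv a (by omega) (by omega)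
    rw [this]; congr 1; ring
  rw [e0, e1, e2]
  conv_rhs => rw [calcA]
  rw [if_neg (show ¬ a > a + L - 1 by omega)]
  have c1 : a + L - 1 - 1 = a + L - 2 := by ring
  have c2 : a + L - 1 - 2 = a + L - 3 := by ring
  rw [c1, c2]
  simp [PySem.List.pyGetD]

-- running the loop from a valid row of length L-2 yields the answer at index 0
theorem rowLoop_spec (arr : List Int) (n : Int) :
    ∀ (L : Int) (g : List Int), 1 ≤ L → L ≤ n + 2 → L % 2 = n % 2 →
      RowInv arr n g (L - 2) →
      PySem.List.pyGetD (rowLoop arr n g L) 0 0 = calcA arr 0 (n - 1) := by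
  intro L g
  fun_induction rowLoop arr n g L with
  | case1 g L hstop =>
    intro h1 h2 hpar hInv
    have hLn : L = n + 2 := by omega
    have := hInv 0 le_rfl (by omega)
    rw [this]; congr 1; omega
  | case2 g L hcont ih =>
    intro h1 h2 hpar hInv
    exact ih (by omega) (by omega) (by omega)
      (by simpa using rowNew_inv arr g n L h1 hInv)

-- ===== VERDICT (by name: the statement is the Claim_ definition above) =====
theorem maximum_margin_spec : Claim_equal_maximum_margin := by
  intro arr _
  unfold Spec_maximum_margin maximum_margin maximum_margin_alt
  by_cases h0 : (arr.length : Int) = 0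
  · simp only [h0]
    rw [calcA]
    norm_num
  · have hn : 1 ≤ (arr.length : Int) := by omega
    simp only [beq_iff_eq, if_neg h0]
    have hmod : PySem.Int.mod (arr.length : Int) 2 = (arr.length : Int) % 2 := by
      rw [PySem.Int.mod_eq_emod_of_pos]; omega
    rw [hmod]
    refine (rowLoop_spec arr (arr.length : Int) (2 - (arr.length : Int) % 2) _
      (by omega) (by omega) (by omega) ?_).symm
    intro a ha0 haU
    rw [pyGetD_replicate_zero]
    rw [calcA]
    rw [if_pos (by omega)]
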